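-- pv_equiv track=rewrite | github.com/Garco97/NLP_Final | data_process.py | clean_document
-- ===== SOURCE A (Python) =====
-- import string
--
-- def clean_document(document):
--     new_document = list()
--     for word in document:
--         bad = False
--         for punct in string.punctuation:
--             if punct in word or word in string.punctuation:
--                 bad = True
--                 break
--         if not bad:
--             new_document.append(word)
--     return new_document
-- ===== SOURCE B (Python) =====
-- import string
--
-- def clean_document(document):
--     punct = set(string.punctuation)
--     return [word for word in document
--             if word and not any(c in punct for c in word)]
-- ===== Notes on version B (the rewrite author's own statement) =====
-- stated objective: simpler
-- what changed: Replaces the flag-and-break double loop (substring-searching each of the 32 punctuation characters in the word) by a single filter comprehension testing each character of the word against a precomputed punctuation set, with the empty-word exclusion made explicit by the truthiness test.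
import Mathlib
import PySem

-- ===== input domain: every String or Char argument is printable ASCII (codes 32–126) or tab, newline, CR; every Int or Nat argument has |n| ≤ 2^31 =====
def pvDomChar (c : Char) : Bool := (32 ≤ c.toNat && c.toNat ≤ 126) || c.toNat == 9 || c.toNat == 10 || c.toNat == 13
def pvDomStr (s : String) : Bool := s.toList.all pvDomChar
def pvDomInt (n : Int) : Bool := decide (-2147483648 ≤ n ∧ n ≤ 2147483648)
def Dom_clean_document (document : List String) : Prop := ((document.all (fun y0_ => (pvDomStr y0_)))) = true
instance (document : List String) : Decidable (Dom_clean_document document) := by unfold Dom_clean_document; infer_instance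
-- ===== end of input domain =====

-- B replaces A's flag-and-break double loop (searching each punctuation character as a
-- substring of the word) by one filter testing the word's own characters against a
-- punctuation set; objective: simpler.

-- string.punctuation
def pvPunct : List Char := "!\"#$%&'()*+,-./:;<=>?@[\\]^_`{|}~".toList

-- ===== PORT A =====
-- inner 'for punct in string.punctuation: … break' loop, returning the final 'bad' flag
def pvBad (word : String) : List Char → Bool
  | [] => false
  | p :: rest =>
      if PySem.Chars.isIn [p] word.toList || PySem.Chars.isIn word.toList pvPunct then true
      else pvBad word rest

def clean_document (document : List String) : List String :=
  document.foldl (fun new_document word =>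
    if !pvBad word pvPunct then new_document ++ [word] else new_document) []

-- ===== PORT B =====
def pvPunctSet : PySem.Set Char := PySem.Set.ofList pvPunct

def clean_document_alt (document : List String) : List String :=
  document.filter (fun word =>
    !word.toList.isEmpty && !word.toList.any (fun c => PySem.Set.contains pvPunctSet c))

-- ===== PRECONDITION & SPEC =====
def Spec_clean_document (document : List String) (out : List String) : Prop := out = clean_document_alt document
instance (document : List String) (out : List String) : Decidable (Spec_clean_document document out) := by unfold Spec_clean_document; infer_instance

-- ===== CLAIM (what is proved, stated in full; the proofs are below) =====
def Claim_equal_clean_document : Prop := ∀ (document : List String), Dom_clean_document document → Spec_clean_document document (clean_document document)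

-- ===== LEMMAS AND PROOFS =====

-- A's inner break loop is an 'any' over the punctuation characters
theorem pvBad_eq_any (word : String) (l : List Char) :
    pvBad word l = l.any (fun p =>
      PySem.Chars.isIn [p] word.toList || PySem.Chars.isIn word.toList pvPunct) := by
  induction l with
  | nil => rfl
  | cons p rest ih =>
      simp only [pvBad, List.any_cons]
      split_ifs with h
      · simp [h]
      · simp [h, ih]

theorem singleton_infix_iff {p : Char} {l : List Char} : [p] <:+: l ↔ p ∈ l := by
  constructor
  · intro h; exact h.sublist.subset (by simp)
  · intro h
    obtain ⟨s, t, rfl⟩ := List.mem_iff_append.mp h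
    exact ⟨s, t, by simp⟩

theorem pvBad_iff (word : String) :
    pvBad word pvPunct = true ↔
      word.toList = [] ∨ ∃ c ∈ word.toList, c ∈ pvPunct := by
  rw [pvBad_eq_any]
  simp only [List.any_eq_true, Bool.or_eq_true, PySem.Chars.isIn_iff_infix]
  constructor
  · rintro ⟨p, hp, h | h⟩
    · exact Or.inr ⟨p, singleton_infix_iff.mp h, hp⟩
    · rcases hw : word.toList with _ | ⟨c, cs⟩
      · exact Or.inl rfl
      · refine Or.inr ⟨c, by simp, ?_⟩
        exact h.sublist.subset (by simp [hw])
  · rintro (h | ⟨c, hc, hcp⟩)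
    · refine ⟨'!', by decide, Or.inr ?_⟩
      rw [h]; exact List.nil_infix
    · exact ⟨c, hcp, Or.inl (singleton_infix_iff.mpr hc)⟩

theorem pvPunctSet_eq : pvPunctSet = pvPunct := by decide

theorem keep_iff (word : String) :
    (!pvBad word pvPunct) =
      (!word.toList.isEmpty && !word.toList.any (fun c => PySem.Set.contains pvPunctSet c)) := by
  have hmem : ∀ c : Char, (PySem.Set.contains pvPunctSet c = true) ↔ c ∈ pvPunct := by
    intro c
    rw [PySem.Set.contains_iff, pvPunctSet_eq]
  rw [Bool.eq_iff_iff]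
  simp only [Bool.not_eq_true', Bool.and_eq_true, List.any_eq_false]
  constructor
  · intro hb
    have h' : ¬(word.toList = [] ∨ ∃ c ∈ word.toList, c ∈ pvPunct) := by
      rw [← pvBad_iff, hb]; simp
    push Not at h'
    refine ⟨by simp [h'.1], fun c hc => ?_⟩
    simpa [hmem c] using h'.2 c hc
  · rintro ⟨h1, h2⟩
    by_contra hb
    rcases (pvBad_iff word).mp (by simpa using hb) with h | ⟨c, hc, hcp⟩
    · simp [h] at h1
    · exact absurd ((hmem c).mpr hcp) (by simpa using h2 c hc)

-- ===== VERDICT (by name: the statement is the Claim_ definition above) =====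
theorem clean_document_spec : Claim_equal_clean_document := by
  intro document _
  unfold Spec_clean_document clean_document clean_document_alt
  rw [PySem.List.foldl_append_if_eq_filter]
  simp only [List.nil_append]
  exact List.filter_congr (fun w _ => keep_iff w)
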